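-- pv_equiv track=rewrite | github.com/caseylinden/ChessGame | last_version_b.py | near_enemy_rook
-- ===== SOURCE A (Python) =====
-- white_pieces = ['rook', 'knight', 'bishop', 'queen', 'king', 'bishop', 'knight', 'rook',
--                 'pawn', 'pawn', 'pawn', 'pawn', 'pawn', 'pawn', 'pawn', 'pawn']
--
-- black_pieces = ['rook', 'knight', 'bishop', 'queen', 'king', 'bishop', 'knight', 'rook',
--                 'pawn', 'pawn', 'pawn', 'pawn', 'pawn', 'pawn', 'pawn', 'pawn']
--
-- black_locations = [(0, 0), (1, 0), (2, 0), (3, 0), (4, 0), (5, 0), (6, 0), (7, 0),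
--                    (0, 1), (1, 1), (2, 1), (3, 1), (4, 1), (5, 1), (6, 1), (7, 1)]
--
-- white_locations = [(0, 7), (1, 7), (2, 7), (3, 7), (4, 7), (5, 7), (6, 7), (7, 7),
--                    (0, 6), (1, 6), (2, 6), (3, 6), (4, 6), (5, 6), (6, 6), (7, 6)]
--
-- def near_enemy_rook(king_position, color):
--     moves_list = []
--     if color == 'white':
--         allies_locations = white_locations
--         enemies_locations = black_locations
--         enemies_pieces = black_pieces
--
--     else:
--         allies_locations = black_locations
--         enemies_locations = white_locations
--         enemies_pieces = white_pieces
--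
--     for k in range(len(enemies_pieces)):
--         if enemies_pieces[k] == 'rook':
--             position = enemies_locations[k]
--             for i in range(4):  # up, down, right, left
--                 if i == 0:  # up
--                     for j in range(1, 8):
--                         if (position[0], position[1] - j) not in allies_locations and (position[1] - j) > -1:
--                             if (position[0], position[1] - j) not in enemies_locations:
--                                 moves_list.append((position[0], position[1] - j))
--                             else:
--                                 moves_list.append((position[0], position[1] - j))
--                                 break
--                         elif (position[0], position[1] - j) in allies_locations:
--                             moves_list.append((position[0], position[1] - j))
--                             break
--                         else:
--                             break
--                 elif i == 1:  # down
--                     for j in range(1, 8):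
--                         if (position[0], position[1] + j) not in allies_locations and (position[1] + j) < 8:
--                             if (position[0], position[1] + j) not in enemies_locations:
--                                 moves_list.append((position[0], position[1] + j))
--                             else:
--                                 moves_list.append((position[0], position[1] + j))
--                                 break
--                         elif (position[0], position[1] + j) in allies_locations:
--                             moves_list.append((position[0], position[1] + j))
--                             break
--                         else:
--                             break
--                 elif i == 2:  # right
--                     for j in range(1, 8):
--                         if (position[0] + j, position[1]) not in allies_locations and (position[0] + j) < 8:
--                             if (position[0] + j, position[1]) not in enemies_locations:
--                                 moves_list.append((position[0] + j, position[1]))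
--                             else:
--                                 moves_list.append((position[0] + j, position[1]))
--                                 break
--                         elif (position[0] + j, position[1]) in allies_locations:
--                             moves_list.append((position[0] + j, position[1]))
--                             break
--                         else:
--                             break
--                 else:  # left
--                     for j in range(1, 8):
--                         if (position[0] - j, position[1]) not in allies_locations and (position[0] - j) > -1:
--                             if (position[0] - j, position[1]) not in enemies_locations:
--                                 moves_list.append((position[0] - j, position[1]))
--                             else:
--                                 moves_list.append((position[0] - j, position[1]))
--                                 break
--                         elif (position[0] - j, position[1]) in allies_locations:
--                             moves_list.append((position[0] - j, position[1]))
--                             break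
--                         else:
--                             break
--     if king_position in moves_list:
--         return True
--     else:
--         return False
-- ===== SOURCE B (Python) =====
-- white_pieces = ['rook', 'knight', 'bishop', 'queen', 'king', 'bishop', 'knight', 'rook',
--                 'pawn', 'pawn', 'pawn', 'pawn', 'pawn', 'pawn', 'pawn', 'pawn']
--
-- black_pieces = ['rook', 'knight', 'bishop', 'queen', 'king', 'bishop', 'knight', 'rook',
--                 'pawn', 'pawn', 'pawn', 'pawn', 'pawn', 'pawn', 'pawn', 'pawn']
--
-- black_locations = [(0, 0), (1, 0), (2, 0), (3, 0), (4, 0), (5, 0), (6, 0), (7, 0),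
--                    (0, 1), (1, 1), (2, 1), (3, 1), (4, 1), (5, 1), (6, 1), (7, 1)]
--
-- white_locations = [(0, 7), (1, 7), (2, 7), (3, 7), (4, 7), (5, 7), (6, 7), (7, 7),
--                    (0, 6), (1, 6), (2, 6), (3, 6), (4, 6), (5, 6), (6, 6), (7, 6)]
--
--
-- def near_enemy_rook(king_position, color):
--     # For each enemy rook, ray-cast straight toward the king square: the king is
--     # "near" iff it is on the board, shares a rank or file with the rook, and all
--     # squares strictly between them are empty (the king square itself may be occupied).
--     if color == 'white':
--         allies, enemies, pieces = white_locations, black_locations, black_pieces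
--     else:
--         allies, enemies, pieces = black_locations, white_locations, white_pieces
--     kx, ky = king_position
--     if not (0 <= kx <= 7 and 0 <= ky <= 7):
--         return False
--     occupied = set(allies) | set(enemies)
--     for piece, (px, py) in zip(pieces, enemies):
--         if piece != 'rook' or (px, py) == (kx, ky):
--             continue
--         if px == kx:
--             step = 1 if ky > py else -1
--             if all((px, y) not in occupied for y in range(py + step, ky, step)):
--                 return True
--         elif py == ky:
--             step = 1 if kx > px else -1
--             if all((x, py) not in occupied for x in range(px + step, kx, step)):
--                 return True
--     return False
-- ===== Notes on version B (the rewrite author's own statement) =====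
-- stated objective: idiomatic
-- what changed: Instead of generating every rook move in all four directions into a moves_list and testing membership, B ray-casts from each enemy rook directly toward the king square: shared rank/file, on-board, and all strictly-between squares empty, returning True on the first attacking rook.
import Mathlib
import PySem

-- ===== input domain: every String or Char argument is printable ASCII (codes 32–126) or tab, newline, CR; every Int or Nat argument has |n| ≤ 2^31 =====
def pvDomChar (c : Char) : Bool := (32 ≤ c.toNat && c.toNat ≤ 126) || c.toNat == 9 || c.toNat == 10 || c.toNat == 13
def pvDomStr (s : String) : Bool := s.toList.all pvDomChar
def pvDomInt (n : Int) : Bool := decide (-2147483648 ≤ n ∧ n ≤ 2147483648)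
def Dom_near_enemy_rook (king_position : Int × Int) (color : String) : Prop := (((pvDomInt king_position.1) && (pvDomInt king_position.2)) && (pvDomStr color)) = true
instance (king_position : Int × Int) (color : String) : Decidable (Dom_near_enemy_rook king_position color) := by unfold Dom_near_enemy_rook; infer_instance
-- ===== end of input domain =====

-- B replaces A's full rook move-list generation by a direct ray-cast from each enemy rook toward the king (idiomatic, not faster).


-- ===== PORT A =====
def pv_white_pieces : List String :=
  ["rook", "knight", "bishop", "queen", "king", "bishop", "knight", "rook",
   "pawn", "pawn", "pawn", "pawn", "pawn", "pawn", "pawn", "pawn"]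
def pv_black_pieces : List String :=
  ["rook", "knight", "bishop", "queen", "king", "bishop", "knight", "rook",
   "pawn", "pawn", "pawn", "pawn", "pawn", "pawn", "pawn", "pawn"]
def pv_black_locations : List (Int × Int) :=
  [(0, 0), (1, 0), (2, 0), (3, 0), (4, 0), (5, 0), (6, 0), (7, 0),
   (0, 1), (1, 1), (2, 1), (3, 1), (4, 1), (5, 1), (6, 1), (7, 1)]
def pv_white_locations : List (Int × Int) :=
  [(0, 7), (1, 7), (2, 7), (3, 7), (4, 7), (5, 7), (6, 7), (7, 7),
   (0, 6), (1, 6), (2, 6), (3, 6), (4, 6), (5, 6), (6, 6), (7, 6)]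

-- one inner 'for j in range(1, 8)' of A, with its breaks; sq j is the probed square, inBoard j the branch's bound test
def pvDirScan (allies enemies : List (Int × Int)) (sq : Int → Int × Int) (inBoard : Int → Bool) :
    List Int → List (Int × Int) → List (Int × Int)
  | [], acc => acc
  | j :: rest, acc =>
    if !(allies.contains (sq j)) && inBoard j then
      if !(enemies.contains (sq j)) then
        pvDirScan allies enemies sq inBoard rest (acc ++ [sq j])
      else acc ++ [sq j]
    else if allies.contains (sq j) then acc ++ [sq j]
    else acc

-- the 'for k … for i in range(4)' loops of A building moves_list
def pvMovesFor (allies enemies : List (Int × Int)) (enemies_pieces : List String) : List (Int × Int) :=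
  (PySem.List.pyRange 0 (PySem.List.len enemies_pieces) 1).foldl (fun acc k =>
    if PySem.List.pyGetD enemies_pieces k "" == "rook" then
      let position := PySem.List.pyGetD enemies k (0, 0)
      (PySem.List.pyRange 0 4 1).foldl (fun acc2 i =>
        if i == 0 then  -- up
          pvDirScan allies enemies (fun j => (position.1, position.2 - j))
            (fun j => position.2 - j > -1) (PySem.List.pyRange 1 8 1) acc2
        else if i == 1 then  -- down
          pvDirScan allies enemies (fun j => (position.1, position.2 + j))
            (fun j => position.2 + j < 8) (PySem.List.pyRange 1 8 1) acc2
        else if i == 2 then  -- right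
          pvDirScan allies enemies (fun j => (position.1 + j, position.2))
            (fun j => position.1 + j < 8) (PySem.List.pyRange 1 8 1) acc2
        else  -- left
          pvDirScan allies enemies (fun j => (position.1 - j, position.2))
            (fun j => position.1 - j > -1) (PySem.List.pyRange 1 8 1) acc2) acc
    else acc) []

def near_enemy_rook (king_position : Int × Int) (color : String) : Bool :=
  let moves_list :=
    if color == "white" then pvMovesFor pv_white_locations pv_black_locations pv_black_pieces
    else pvMovesFor pv_black_locations pv_white_locations pv_white_pieces
  moves_list.contains king_position

-- ===== PORT B =====
-- squares strictly between the rook (px,py) and the on-line king square: B's 'all(... for _ in range(p+step, k, step))'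
def pvRayClear (occupied : List (Int × Int)) (px py kx ky : Int) : Bool :=
  if px == kx then
    let step : Int := if ky > py then 1 else -1
    (PySem.List.pyRange (py + step) ky step).all (fun y => !(occupied.contains (px, y)))
  else if py == ky then
    let step : Int := if kx > px then 1 else -1
    (PySem.List.pyRange (px + step) kx step).all (fun x => !(occupied.contains (x, py)))
  else false

def near_enemy_rook_alt (king_position : Int × Int) (color : String) : Bool :=
  let (allies, enemies, pieces) :=
    if color == "white" then (pv_white_locations, pv_black_locations, pv_black_pieces)
    else (pv_black_locations, pv_white_locations, pv_white_pieces)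
  let kx := king_position.1
  let ky := king_position.2
  if !(decide (0 ≤ kx ∧ kx ≤ 7 ∧ 0 ≤ ky ∧ ky ≤ 7)) then false
  else
    -- set(allies) | set(enemies): only membership is used, so the union Set is the concatenation for 'contains'
    let occupied := PySem.Set.union (PySem.Set.ofList allies) enemies
    (pieces.zip enemies).any (fun pe =>
      pe.1 == "rook" && !(pe.2 == (kx, ky)) && pvRayClear occupied pe.2.1 pe.2.2 kx ky)

-- ===== PRECONDITION & SPEC =====
def Spec_near_enemy_rook (king_position : Int × Int) (color : String) (out : Bool) : Prop := out = near_enemy_rook_alt king_position color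
instance (king_position : Int × Int) (color : String) (out : Bool) : Decidable (Spec_near_enemy_rook king_position color out) := by unfold Spec_near_enemy_rook; infer_instance

-- ===== CLAIM (what is proved, stated in full; the proofs are below) =====
def Claim_equal_near_enemy_rook : Prop := ∀ (king_position : Int × Int) (color : String), Dom_near_enemy_rook king_position color → Spec_near_enemy_rook king_position color (near_enemy_rook king_position color)

-- ===== LEMMAS AND PROOFS =====
-- A's generated move lists are closed data: evaluate them once
theorem pvMovesWhite :
    pvMovesFor pv_white_locations pv_black_locations pv_black_pieces = [(0, 1), (1, 0), (7, 1), (6, 0)] := by decide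

theorem pvMovesBlack :
    pvMovesFor pv_black_locations pv_white_locations pv_white_pieces = [(0, 6), (1, 7), (7, 6), (6, 7)] := by decide

-- the fixed-color bodies agree for every king square
theorem pvWhiteCase (kx ky : Int) :
    near_enemy_rook (kx, ky) "white" = near_enemy_rook_alt (kx, ky) "white" := by
  by_cases hb : 0 ≤ kx ∧ kx ≤ 7 ∧ 0 ≤ ky ∧ ky ≤ 7
  · obtain ⟨h1, h2, h3, h4⟩ := hb
    interval_cases kx <;> interval_cases ky <;> decide
  · simp only [near_enemy_rook, near_enemy_rook_alt, pvMovesWhite]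
    simp [hb, Prod.ext_iff]
    omega

theorem pvBlackCase (kx ky : Int) (color : String) (hc : (color == "white") = false) :
    near_enemy_rook (kx, ky) color = near_enemy_rook_alt (kx, ky) color := by
  by_cases hb : 0 ≤ kx ∧ kx ≤ 7 ∧ 0 ≤ ky ∧ ky ≤ 7
  · obtain ⟨h1, h2, h3, h4⟩ := hb
    simp only [near_enemy_rook, near_enemy_rook_alt, hc]
    interval_cases kx <;> interval_cases ky <;> decide
  · simp only [near_enemy_rook, near_enemy_rook_alt, hc, pvMovesBlack]
    simp [hb, Prod.ext_iff]
    omega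

-- ===== VERDICT (by name: the statement is the Claim_ definition above) =====
theorem near_enemy_rook_spec : Claim_equal_near_enemy_rook := by
  intro kp color _
  unfold Spec_near_enemy_rook
  obtain ⟨kx, ky⟩ := kp
  by_cases hc : (color == "white") = true
  · rw [beq_iff_eq] at hc
    subst hc
    exact pvWhiteCase kx ky
  · exact pvBlackCase kx ky color (by simpa using hc)
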